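-- pv_equiv track=rewrite | github.com/kamerok/aoc | python/2025/solutions/day01.py | part_1
-- ===== SOURCE A (Python) =====
-- def part_1(data):
--     instructions = [(line[0] == 'L', int(line[1:])) for line in data]
--     current = 50
--     zeroes = 0
--     for is_left, steps in instructions:
--         if is_left:
--             current = current - steps % 100
--             if current < 0:
--                 current = 100 + current
--         else:
--             current = current + steps
--             if current > 99:
--                 current = current % 100
--         if current == 0:
--             zeroes = zeroes + 1
--     return zeroes
-- ===== SOURCE B (Python) =====
-- def part_1(data):
--     # Divide and conquer: each segment yields (total displacement, list of
--     # prefix-displacement residues mod 100); the right half's residues are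
--     # shifted by the left half's total when merging.  Answer = residues == 50,
--     # since position hits 0 exactly when cumulative displacement = 50 (mod 100).
--     def solve(lines):
--         if not lines:
--             return (0, [])
--         if len(lines) == 1:
--             line = lines[0]
--             d = -int(line[1:]) if line[0] == 'L' else int(line[1:])
--             return (d, [d % 100])
--         mid = len(lines) // 2
--         sl, rl = solve(lines[:mid])
--         sr, rr = solve(lines[mid:])
--         return (sl + sr, rl + [(sl + r) % 100 for r in rr])
--     _, res = solve(data)
--     return sum(1 for r in res if r == 50)
-- ===== Notes on version B (the rewrite author's own statement) =====
-- stated objective: alternative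
-- what changed: B replaces A's single-pass clamped-position state machine by a divide-and-conquer: each half-segment returns (total displacement, list of prefix-residues mod 100), halves merge by shifting the right half's residues by the left total, and the answer counts residues equal to 50.
-- outside the precondition, e.g. on part_1(['R-150']): A returns 0, B returns 1; on part_1(['']): A raises IndexError, B raises IndexError
import Mathlib
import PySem

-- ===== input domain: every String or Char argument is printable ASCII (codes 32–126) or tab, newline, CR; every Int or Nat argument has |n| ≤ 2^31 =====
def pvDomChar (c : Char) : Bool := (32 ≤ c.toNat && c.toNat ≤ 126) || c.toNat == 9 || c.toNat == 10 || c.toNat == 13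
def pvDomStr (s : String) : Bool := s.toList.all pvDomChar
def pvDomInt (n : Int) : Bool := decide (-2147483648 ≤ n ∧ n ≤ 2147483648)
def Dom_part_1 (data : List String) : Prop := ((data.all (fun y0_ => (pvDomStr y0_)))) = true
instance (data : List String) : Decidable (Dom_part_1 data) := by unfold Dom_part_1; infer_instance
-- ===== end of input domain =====

-- B replaces A's single-pass clamped-position state machine by a divide-and-conquer:
-- each half yields (total displacement, prefix residues mod 100), merged by shifting
-- the right half's residues by the left total; the answer counts residues equal to 50.

-- ===== PORT A =====
-- line -> (line[0] == 'L', int(line[1:])); outside Pre_ the parse Option is defaulted.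
def pvParse (line : String) : Bool × Int :=
  (PySem.Str.pyGet? line 0 == some 'L',
   (PySem.Int.ofStr? (PySem.Str.slice line (some 1) none)).getD 0)

-- one iteration of A's loop on the state (current, zeroes)
def pvStepA (st : Int × Int) (ins : Bool × Int) : Int × Int :=
  let current :=
    if ins.1 then
      let c := st.1 - PySem.Int.mod ins.2 100
      if c < 0 then 100 + c else c
    else
      let c := st.1 + ins.2
      if 99 < c then PySem.Int.mod c 100 else c
  (current, if current = 0 then st.2 + 1 else st.2)

def part_1 (data : List String) : Int :=
  let instructions := data.map pvParse
  (instructions.foldl pvStepA (50, 0)).2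

-- ===== PORT B =====
-- d = -int(line[1:]) if line[0] == 'L' else int(line[1:]); parse defaulted outside Pre_
def pvDelta (line : String) : Int :=
  if PySem.Str.pyGet? line 0 == some 'L'
  then -((PySem.Int.ofStr? (PySem.Str.slice line (some 1) none)).getD 0)
  else (PySem.Int.ofStr? (PySem.Str.slice line (some 1) none)).getD 0

-- Source B's solve(lines): (total displacement, prefix-displacement residues mod 100)
def pvSolve : List String → Int × List Int
  | [] => (0, [])
  | [l] => (pvDelta l, [PySem.Int.mod (pvDelta l) 100])
  | l1 :: l2 :: rest =>
    let mid := (l1 :: l2 :: rest).length / 2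
    let left := pvSolve ((l1 :: l2 :: rest).take mid)
    let right := pvSolve ((l1 :: l2 :: rest).drop mid)
    (left.1 + right.1, left.2 ++ right.2.map (fun r => PySem.Int.mod (left.1 + r) 100))
termination_by lines => lines.length
decreasing_by
  all_goals simp only [List.length_take, List.length_drop, List.length_cons]
  all_goals omega

def part_1_alt (data : List String) : Int :=
  (((pvSolve data).2.filter (fun r => r == 50)).length : Int)

-- ===== PRECONDITION & SPEC =====
-- Pre_ restricts to the natural instruction domain: nonempty lines whose suffix int-parses
-- to a NONNEGATIVE step count.  Empty or non-integer lines make A raise (IndexError /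
-- ValueError); on negative step counts A still returns, but its right branch never reduces
-- a negative position mod 100, so we stay on the natural domain instead of mirroring that.
-- (0 ≤ …getD (-1) says exactly: int(line[1:]) succeeds and its value is ≥ 0.)
def Pre_part_1 (data : List String) : Prop :=
  ∀ line ∈ data, line.toList ≠ [] ∧
    0 ≤ (PySem.Int.ofStr? (PySem.Str.slice line (some 1) none)).getD (-1)
instance (data : List String) : Decidable (Pre_part_1 data) := by unfold Pre_part_1; infer_instance

def pvWitness_part_1 : List String := ["L50", "R100", "R0"]

def Spec_part_1 (data : List String) (out : Int) : Prop := out = part_1_alt data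
instance (data : List String) (out : Int) : Decidable (Spec_part_1 data out) := by unfold Spec_part_1; infer_instance

-- ===== CLAIM (what is proved, stated in full; the proofs are below) =====
def Claim_equal_part_1 : Prop := ∀ (data : List String), Dom_part_1 data → Pre_part_1 data → Spec_part_1 data (part_1 data)

-- ===== LEMMAS AND PROOFS =====

-- signed delta of one parsed instruction
def pvDOf (p : Bool × Int) : Int := if p.1 then -p.2 else p.2

theorem pvDelta_eq (line : String) : pvDelta line = pvDOf (pvParse line) := by
  unfold pvDelta pvDOf pvParse
  by_cases h : (PySem.Str.pyGet? line 0 == some 'L') = true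
  · rw [if_pos h]
  · rw [if_neg h]

-- the residues of the running cumulative displacements, reduced mod 100
def pvPrefixes : Int → List Int → List Int
  | _, [] => []
  | t, d :: ds => (t + d) % 100 :: pvPrefixes (t + d) ds

theorem pvPrefixes_shift (t : Int) (ds : List Int) : ∀ u : Int,
    pvPrefixes (t + u) ds = (pvPrefixes u ds).map (fun r => (t + r) % 100) := by
  induction ds with
  | nil => intro u; simp [pvPrefixes]
  | cons d ds ih =>
    intro u
    simp only [pvPrefixes, List.map_cons, List.cons.injEq]
    refine ⟨by omega, ?_⟩
    have := ih (u + d)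
    rw [show t + u + d = t + (u + d) by ring]
    exact this

theorem pvPrefixes_append (xs ys : List Int) : ∀ t : Int,
    pvPrefixes t (xs ++ ys) = pvPrefixes t xs ++ pvPrefixes (t + xs.sum) ys := by
  induction xs with
  | nil => intro t; simp [pvPrefixes]
  | cons d xs ih =>
    intro t
    simp only [List.cons_append, pvPrefixes, List.sum_cons, ih (t + d)]
    rw [show t + d + xs.sum = t + (d + xs.sum) by ring]

theorem pvSolve_eq (lines : List String) :
    pvSolve lines = ((lines.map pvDelta).sum, pvPrefixes 0 (lines.map pvDelta)) := by
  generalize hn : lines.length = n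
  induction n using Nat.strong_induction_on generalizing lines with
  | _ n ih =>
    match lines, hn with
    | [], _ => simp [pvSolve, pvPrefixes]
    | [l], _ =>
      simp [pvSolve, pvPrefixes, PySem.Int.mod, Int.fmod_eq_emod]
    | l1 :: l2 :: rest, hn =>
      have hmid : (l1 :: l2 :: rest).length / 2 < n ∧ 1 ≤ (l1 :: l2 :: rest).length / 2 := by
        simp only [List.length_cons] at hn ⊢; omega
      have htk : ((l1 :: l2 :: rest).take ((l1 :: l2 :: rest).length / 2)).length < n := by
        simp only [List.length_take]; omega
      have hdp : ((l1 :: l2 :: rest).drop ((l1 :: l2 :: rest).length / 2)).length < n := by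
        simp only [List.length_drop]; omega
      have ihl := ih _ htk _ rfl
      have ihr := ih _ hdp _ rfl
      have hmaps : ((l1 :: l2 :: rest).take ((l1 :: l2 :: rest).length / 2)).map pvDelta
          ++ ((l1 :: l2 :: rest).drop ((l1 :: l2 :: rest).length / 2)).map pvDelta
          = (l1 :: l2 :: rest).map pvDelta := by
        rw [← List.map_append, List.take_append_drop]
      rw [pvSolve, ihl, ihr]
      refine Prod.ext ?_ ?_
      · simp only [← hmaps, List.sum_append]
      · simp only [← hmaps, pvPrefixes_append]
        congr 1
        rw [show (0:Int) + (((l1 :: l2 :: rest).take ((l1 :: l2 :: rest).length / 2)).map pvDelta).sum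
              = (((l1 :: l2 :: rest).take ((l1 :: l2 :: rest).length / 2)).map pvDelta).sum + 0 by ring,
            pvPrefixes_shift]
        exact List.map_congr_left (fun r _ =>
          PySem.Int.mod_eq_emod_of_pos (by norm_num))

-- one step of A keeps the invariant current = (50 + t) % 100 and counts residue 50
theorem pvStepA_eq (t : Int) (b : Bool) (n : Int) (hn : 0 ≤ n) (z : Int) :
    pvStepA ((50 + t) % 100, z) (b, n)
      = ((50 + (t + pvDOf (b, n))) % 100,
         if (t + pvDOf (b, n)) % 100 = 50 then z + 1 else z) := by
  have hmod : ∀ a : Int, PySem.Int.mod a 100 = a % 100 := fun a =>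
    PySem.Int.mod_eq_emod_of_pos (by norm_num) ..
  cases b <;>
    simp only [pvStepA, pvDOf, hmod, if_true, if_false, Bool.false_eq_true] <;>
    rw [Prod.mk.injEq] <;>
    constructor <;> split_ifs <;> omega

-- A's fold equals z plus the number of residue-50 prefixes
theorem pvLoopA (ins : List (Bool × Int)) (hpos : ∀ p ∈ ins, 0 ≤ p.2) :
    ∀ (t z : Int),
    (ins.foldl pvStepA ((50 + t) % 100, z)).2
      = z + (((pvPrefixes t (ins.map pvDOf)).filter (fun r => r == 50)).length : Int) := by
  induction ins with
  | nil => intro t z; simp [pvPrefixes]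
  | cons p rest ih =>
    intro t z
    obtain ⟨b, n⟩ := p
    have hn : 0 ≤ n := hpos (b, n) (by simp)
    have ih' := ih (fun q hq => hpos q (by simp [hq]))
    simp only [List.foldl_cons, pvStepA_eq t b n hn z, List.map_cons, pvPrefixes,
      List.filter_cons]
    by_cases h : (t + pvDOf (b, n)) % 100 = 50 <;>
      simp only [h, if_pos, beq_iff_eq, ite_false,
        ih' (t + pvDOf (b, n))] <;>
      simp <;> omega

theorem part_1_eq (data : List String) (hpre : Pre_part_1 data) :
    part_1 data = part_1_alt data := by
  have hmap : (data.map pvParse).map pvDOf = data.map pvDelta := by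
    rw [List.map_map]; exact List.map_congr_left (fun l _ => (pvDelta_eq l).symm)
  have hpos : ∀ p ∈ data.map pvParse, 0 ≤ p.2 := by
    intro p hp
    obtain ⟨l, hl, rfl⟩ := List.mem_map.mp hp
    have h2 := (hpre l hl).2
    cases h : PySem.Int.ofStr? (PySem.Str.slice l (some 1) none) <;>
      rw [h] at h2 <;> simp_all [pvParse]
  have h := pvLoopA (data.map pvParse) hpos 0 0
  rw [show ((50:Int) + 0) % 100 = 50 by norm_num] at h
  simp only [part_1, part_1_alt, pvSolve_eq, hmap] at *
  omega

-- ===== VERDICT (by name: the statement is the Claim_ definition above) =====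
theorem part_1_spec : Claim_equal_part_1 := by
  intro data _ hpre
  exact part_1_eq data hpre
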